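-- pv_equiv track=rewrite | github.com/supersunking123-stupid/auto_waveform_debugger | agent_debug_automation/tools.py | _virtual_leaf_signal_paths
-- ===== SOURCE A (Python) =====
-- from typing import Any, Dict, List, Optional
--
-- def _virtual_leaf_signal_paths(path: str, session: Dict[str, Any]) -> List[str]:
--     created = session.get("created_signals", {})
--     leaves: List[str] = []
--     seen_virtual: set = set()
--     seen_leaf: set = set()
--
--     def _visit(name: str) -> None:
--         info = created.get(name)
--         if info is None:
--             if name not in seen_leaf:
--                 seen_leaf.add(name)
--                 leaves.append(name)
--             return
--         if name in seen_virtual: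
--             return
--         seen_virtual.add(name)
--         for dep in info.get("dependencies", []):
--             _visit(dep)
--
--     _visit(path)
--     return leaves
-- ===== SOURCE B (Python) =====
-- from typing import Any, Dict, List
--
--
-- def _virtual_leaf_signal_paths(path: str, session: Dict[str, Any]) -> List[str]:
--     created = session.get("created_signals", {})
--     leaves: List[str] = []
--     seen_virtual: set = set()
--     seen_leaf: set = set()
--     stack: List[str] = [path]
--     while stack:
--         name = stack.pop()
--         info = created.get(name)
--         if info is None:
--             if name not in seen_leaf:
--                 seen_leaf.add(name)
--                 leaves.append(name)
--         elif name not in seen_virtual: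
--             seen_virtual.add(name)
--             stack.extend(reversed(info.get("dependencies", [])))
--     return leaves
-- ===== Notes on version B (the rewrite author's own statement) =====
-- stated objective: alternative
-- what changed: The recursive nested `_visit` DFS is replaced by an iterative DFS with an explicit list-stack (popping a name, pushing dependencies in reversed order), preserving the exact pre-order leaf sequence and dedup behaviour without Python recursion.
import Mathlib
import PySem

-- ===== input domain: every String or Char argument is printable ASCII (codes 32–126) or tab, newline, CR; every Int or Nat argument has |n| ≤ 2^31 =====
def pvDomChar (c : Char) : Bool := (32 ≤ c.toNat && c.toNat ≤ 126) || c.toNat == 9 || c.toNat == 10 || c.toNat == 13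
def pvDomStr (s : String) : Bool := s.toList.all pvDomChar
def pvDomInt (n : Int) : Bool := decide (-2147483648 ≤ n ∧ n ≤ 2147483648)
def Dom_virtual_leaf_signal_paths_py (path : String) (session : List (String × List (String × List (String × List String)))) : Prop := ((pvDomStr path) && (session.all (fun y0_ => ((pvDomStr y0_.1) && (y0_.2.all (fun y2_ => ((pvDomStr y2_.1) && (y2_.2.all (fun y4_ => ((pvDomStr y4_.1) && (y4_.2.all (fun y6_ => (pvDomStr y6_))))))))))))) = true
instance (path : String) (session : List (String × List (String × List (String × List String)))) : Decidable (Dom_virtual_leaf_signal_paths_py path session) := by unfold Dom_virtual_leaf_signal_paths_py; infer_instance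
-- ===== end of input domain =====

-- B replaces A's recursive nested `_visit` by an iterative DFS with an explicit stack (alternative
-- decomposition, same cost); both produce the identical leaf list, as proved below.

-- Shared measure/termination helpers (cited by name in the ports' `decreasing_by` / fuel bound):
-- number of keys of `created` not yet in the seen-virtual set (counted with multiplicity).
def pvUnseen (created : List (String × List (String × List String))) (sv : PySem.Set String) : Nat :=
  ((PySem.Dict.mk created).keys.filter (fun k => !sv.contains k)).length

theorem pvMemKeys_of_get?_eq_some {ν : Type} (l : List (String × ν)) (name : String) (v : ν)
    (h : (PySem.Dict.mk l).get? name = some v) : name ∈ l.map (·.1) := by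
  induction l with
  | nil => simp [PySem.Dict.get?] at h
  | cons p rest ih =>
    rw [show PySem.Dict.mk (p :: rest) = PySem.Dict.mk (p :: rest) from rfl] at h
    rcases p with ⟨k, w⟩
    rw [PySem.Dict.get?_mk_cons] at h
    by_cases hk : k = name
    · simp [hk]
    · simp [hk] at h
      simp [ih h]

theorem pvUnseen_add_lt (created : List (String × List (String × List String)))
    (sv : PySem.Set String) (name : String) (info : List (String × List String))
    (hsome : (PySem.Dict.mk created).get? name = some info)
    (hnot : name ∉ sv) :
    pvUnseen created (sv.add name) < pvUnseen created sv := by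
  have hmem : name ∈ (PySem.Dict.mk created).keys := by
    simpa [PySem.Dict.keys] using pvMemKeys_of_get?_eq_some created name info hsome
  unfold pvUnseen
  rw [show PySem.Set.add sv name = sv ++ [name] by simp [PySem.Set.add, hnot]]
  -- strict decrease: `name` passes the old filter but not the new one
  have main : ∀ l : List String, name ∈ l →
      (l.filter (fun k => !(sv ++ [name]).contains k)).length <
      (l.filter (fun k => !sv.contains k)).length := by
    intro l hl
    induction l with
    | nil => cases hl
    | cons a l ih =>
      have hle : (l.filter (fun k => !(sv ++ [name]).contains k)).length ≤
          (l.filter (fun k => !sv.contains k)).length := by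
        rw [← List.countP_eq_length_filter, ← List.countP_eq_length_filter]
        refine List.countP_mono_left ?_
        intro x _ hx
        have hx' : x ∉ sv ++ [name] := by simpa using hx
        have hxs : x ∉ sv := fun hm => hx' (List.mem_append_left _ hm)
        simpa using hxs
      by_cases ha : a = name
      · rw [ha]
        have h1 : (!sv.contains name) = true := by simpa using hnot
        have h2 : (!(sv ++ [name]).contains name) = false := by simp
        simp only [List.filter_cons, h1, h2, if_true, Bool.false_eq_true, if_false,
          List.length_cons]
        omega
      · have hl' : name ∈ l := by
          cases hl with
          | head => exact absurd rfl ha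
          | tail _ h => exact h
        have hlt := ih hl'
        by_cases hc2 : (!(sv ++ [name]).contains a) = true
        · have h1 : (!sv.contains a) = true := by
            have ha' : a ∉ sv ++ [name] := by simpa using hc2
            have has : a ∉ sv := fun hm => ha' (List.mem_append_left _ hm)
            simpa using has
          simp only [List.filter_cons, hc2, h1, if_true, List.length_cons]
          omega
        · have hc2' : (!(sv ++ [name]).contains a) = false := by simpa using hc2
          by_cases h1 : (!sv.contains a) = true
          · simp only [List.filter_cons, hc2', h1, if_true, Bool.false_eq_true, if_false,
              List.length_cons]
            omega
          · have h1' : (!sv.contains a) = false := by simpa using h1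
            simp only [List.filter_cons, hc2', h1', Bool.false_eq_true, if_false]
            exact hlt
  exact main _ hmem

-- ===== PORT A =====
-- literal port of the recursive `_visit` (the `for dep in …: _visit(dep)` loop is the foldl);
-- the Nat fuel only makes the recursion structurally total: the depth of A's recursion is
-- bounded by the number of `created` keys (each nesting adds one to seen_virtual), so the
-- fuel `created.length + 1` supplied below is never exhausted (proved via `pvUnseen`).
def pvVisitA (created : List (String × List (String × List String))) :
    Nat → String → List String × PySem.Set String × PySem.Set String →
    List String × PySem.Set String × PySem.Set String
  | 0, _, st => st
  | f + 1, name, st =>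
    match (PySem.Dict.mk created).get? name with
    | none =>
        if st.2.2.contains name then st
        else (st.1 ++ [name], st.2.1, st.2.2.add name)
    | some info =>
        if st.2.1.contains name then st
        else ((PySem.Dict.mk info).getD "dependencies" []).foldl
              (fun s dep => pvVisitA created f dep s) (st.1, st.2.1.add name, st.2.2)

def virtual_leaf_signal_paths_py (path : String) (session : List (String × List (String × List (String × List String)))) : List String :=
  let created := (PySem.Dict.mk session).getD "created_signals" []
  (pvVisitA created (created.length + 1) path ([], [], [])).1

-- ===== PORT B =====
-- iterative DFS; the stack is modelled top-first (head = Python's last element), so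
-- `stack.pop()` is taking the head and `stack.extend(reversed(deps))` is `deps ++ rest`.
def pvLoopB (created : List (String × List (String × List String))) :
    List String → List String × PySem.Set String × PySem.Set String →
    List String × PySem.Set String × PySem.Set String
  | [], st => st
  | name :: rest, st =>
    match h : (PySem.Dict.mk created).get? name with
    | none =>
        if st.2.2.contains name then pvLoopB created rest st
        else pvLoopB created rest (st.1 ++ [name], st.2.1, st.2.2.add name)
    | some info =>
        if hv : st.2.1.contains name then pvLoopB created rest st
        else pvLoopB created (((PySem.Dict.mk info).getD "dependencies" []) ++ rest)
              (st.1, st.2.1.add name, st.2.2)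
  termination_by stack st => (pvUnseen created st.2.1, stack.length)
  decreasing_by
  · exact Prod.Lex.right _ (by simp only [List.length_cons]; omega)
  · exact Prod.Lex.right _ (by simp only [List.length_cons]; omega)
  · exact Prod.Lex.right _ (by simp only [List.length_cons]; omega)
  · exact Prod.Lex.left _ _ (pvUnseen_add_lt created st.2.1 name info h (by simpa using hv))

def virtual_leaf_signal_paths_py_alt (path : String) (session : List (String × List (String × List (String × List String)))) : List String :=
  let created := (PySem.Dict.mk session).getD "created_signals" []
  (pvLoopB created [path] ([], [], [])).1

-- ===== PRECONDITION & SPEC =====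
def Spec_virtual_leaf_signal_paths_py (path : String) (session : List (String × List (String × List (String × List String)))) (out : List String) : Prop := out = virtual_leaf_signal_paths_py_alt path session
instance (path : String) (session : List (String × List (String × List (String × List String)))) (out : List String) : Decidable (Spec_virtual_leaf_signal_paths_py path session out) := by unfold Spec_virtual_leaf_signal_paths_py; infer_instance

-- ===== CLAIM (what is proved, stated in full; the proofs are below) =====
def Claim_equal_virtual_leaf_signal_paths_py : Prop := ∀ (path : String) (session : List (String × List (String × List (String × List String)))), Dom_virtual_leaf_signal_paths_py path session → Spec_virtual_leaf_signal_paths_py path session (virtual_leaf_signal_paths_py path session)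

-- ===== LEMMAS AND PROOFS =====

-- seen_virtual only grows under a visit
theorem pvVisitA_seenV_subset (created : List (String × List (String × List String))) :
    ∀ (f : Nat) (name : String) (st : List String × PySem.Set String × PySem.Set String),
      ∀ k, k ∈ st.2.1 → k ∈ (pvVisitA created f name st).2.1 := by
  intro f
  induction f with
  | zero => intro name st k hk; simpa [pvVisitA] using hk
  | succ f ih =>
    intro name st k hk
    rw [pvVisitA]
    cases hg : (PySem.Dict.mk created).get? name with
    | none =>
      dsimp only
      by_cases hl : name ∈ st.2.2 <;> simp [hl, hk]
    | some info =>
      dsimp only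
      by_cases hv : name ∈ st.2.1
      · simp [hv, hk]
      · rw [if_neg (show ¬ st.2.1.contains name = true by simpa using hv)]
        have hfold : ∀ (L : List String) (st' : List String × PySem.Set String × PySem.Set String),
            k ∈ st'.2.1 → k ∈ (L.foldl (fun s dep => pvVisitA created f dep s) st').2.1 := by
          intro L
          induction L with
          | nil => intro st' h; simpa using h
          | cons d L ihL =>
            intro st' h
            exact ihL _ (ih d st' k h)
        exact hfold _ _ (by simp [PySem.Set.mem_add, hk])

theorem pvUnseen_le_of_subset (created : List (String × List (String × List String)))
    (sv sv' : PySem.Set String) (h : ∀ k, k ∈ sv → k ∈ sv') :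
    pvUnseen created sv' ≤ pvUnseen created sv := by
  unfold pvUnseen
  rw [← List.countP_eq_length_filter, ← List.countP_eq_length_filter]
  refine List.countP_mono_left ?_
  intro x _ hx
  simp only [Bool.not_eq_true'] at hx ⊢
  have hx' : x ∉ sv' := by simpa using hx
  have hns : x ∉ sv := fun hm => hx' (h x hm)
  simpa using hns

-- the bridge: popping a name from B's stack performs exactly one recursive visit of A
theorem pvBridge (created : List (String × List (String × List String))) :
    ∀ (f : Nat) (name : String) (st : List String × PySem.Set String × PySem.Set String)
      (rest : List String), pvUnseen created st.2.1 < f →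
      pvLoopB created (name :: rest) st = pvLoopB created rest (pvVisitA created f name st) := by
  intro f
  induction f with
  | zero => intro name st rest h; omega
  | succ f ihf =>
    intro name st rest h
    rw [pvVisitA, pvLoopB]
    cases hg : (PySem.Dict.mk created).get? name with
    | none =>
      dsimp only
      by_cases hl : name ∈ st.2.2 <;> simp [hl]
    | some info =>
      dsimp only
      by_cases hv : name ∈ st.2.1
      · simp [hv]
      · rw [dif_neg (show ¬ st.2.1.contains name = true by simpa using hv),
          if_neg (show ¬ st.2.1.contains name = true by simpa using hv)]
        -- new virtual node: unseen strictly drops, so fuel f suffices below it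
        have hlt : pvUnseen created (st.2.1.add name) < f := by
          have := pvUnseen_add_lt created st.2.1 name info hg (by simpa using hv)
          omega
        -- list form of the bridge at fuel f
        have hLL : ∀ (L : List String) (st' : List String × PySem.Set String × PySem.Set String)
            (rest' : List String), pvUnseen created st'.2.1 < f →
            pvLoopB created (L ++ rest') st' =
            pvLoopB created rest' (L.foldl (fun s dep => pvVisitA created f dep s) st') := by
          intro L
          induction L with
          | nil => intro st' rest' _; simp
          | cons d L ihL =>
            intro st' rest' h'
            rw [List.cons_append, ihf d st' (L ++ rest') h', List.foldl_cons]
            apply ihL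
            calc pvUnseen created (pvVisitA created f d st').2.1
                ≤ pvUnseen created st'.2.1 :=
                  pvUnseen_le_of_subset created _ _ (pvVisitA_seenV_subset created f d st')
              _ < f := h'
        exact hLL _ _ _ hlt

theorem pvUnseen_init (created : List (String × List (String × List String))) :
    pvUnseen created ([] : PySem.Set String) ≤ created.length := by
  unfold pvUnseen
  calc ((PySem.Dict.mk created).keys.filter (fun k => !([] : List String).contains k)).length
      ≤ (PySem.Dict.mk created).keys.length := List.length_filter_le _ _
    _ = created.length := by simp [PySem.Dict.keys]

theorem pvLoopB_nil (created : List (String × List (String × List String)))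
    (st : List String × PySem.Set String × PySem.Set String) :
    pvLoopB created [] st = st := by
  rw [pvLoopB]

-- ===== VERDICT (by name: the statement is the Claim_ definition above) =====
theorem virtual_leaf_signal_paths_py_spec : Claim_equal_virtual_leaf_signal_paths_py := by
  intro path session _
  unfold Spec_virtual_leaf_signal_paths_py
  simp only [virtual_leaf_signal_paths_py, virtual_leaf_signal_paths_py_alt]
  have h : pvUnseen ((PySem.Dict.mk session).getD "created_signals" []) ([] : PySem.Set String) <
      ((PySem.Dict.mk session).getD "created_signals" []).length + 1 :=
    Nat.lt_succ_of_le (pvUnseen_init _)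
  rw [pvBridge _ _ path ([], [], []) [] h, pvLoopB_nil]
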